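-- pv_equiv track=rewrite | github.com/Yaldaba0th/Tareas-Miscelaneas | python/pass.py | soloespacios
-- ===== SOURCE A (Python) =====
-- def soloespacios(f):
-- 	nv=0
-- 	for x in range (len(f)):
-- 		if f[x]!=" ":
-- 			nv+=1
-- 	if nv==0:
-- 		return True
-- 	else:
-- 		return False
-- ===== SOURCE B (Python) =====
-- def soloespacios(f):
-- 	return f == " " * len(f)
-- ===== Notes on version B (the rewrite author's own statement) =====
-- stated objective: idiomatic
-- what changed: Replaces the index loop that counts non-space characters and compares the count with zero by a single closed-form comparison of f with a same-length string of spaces.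
import Mathlib
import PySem

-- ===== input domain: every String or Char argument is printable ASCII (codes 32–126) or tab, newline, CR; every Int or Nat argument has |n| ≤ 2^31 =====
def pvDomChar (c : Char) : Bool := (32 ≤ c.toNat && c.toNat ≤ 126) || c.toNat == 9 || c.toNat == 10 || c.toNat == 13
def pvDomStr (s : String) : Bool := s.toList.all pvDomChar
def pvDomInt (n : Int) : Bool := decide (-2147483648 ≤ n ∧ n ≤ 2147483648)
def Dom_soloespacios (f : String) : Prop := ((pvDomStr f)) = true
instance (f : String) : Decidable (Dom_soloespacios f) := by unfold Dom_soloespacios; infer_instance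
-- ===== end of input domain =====

-- B replaces A's index loop (count non-space characters, then compare the count
-- with zero) by the closed-form comparison f == " " * len(f); objective: idiomatic.

-- ===== PORT A =====
def soloespacios (f : String) : Bool :=
  let nv : Int :=
    (PySem.List.pyRange 0 (PySem.Str.len f) 1).foldl
      (fun nv x => if PySem.List.pyGetD f.toList x ' ' ≠ ' ' then nv + 1 else nv) 0
  if nv = 0 then true else false

-- ===== PORT B =====
def soloespacios_alt (f : String) : Bool :=
  f.toList == PySem.List.pyRepeat [' '] (PySem.Str.len f)

-- ===== PRECONDITION & SPEC =====
def Spec_soloespacios (f : String) (out : Bool) : Prop := out = soloespacios_alt f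
instance (f : String) (out : Bool) : Decidable (Spec_soloespacios f out) := by unfold Spec_soloespacios; infer_instance

-- ===== CLAIM (what is proved, stated in full; the proofs are below) =====
def Claim_equal_soloespacios : Prop := ∀ (f : String), Dom_soloespacios f → Spec_soloespacios f (soloespacios f)

-- ===== LEMMAS AND PROOFS =====

-- the per-character fold counts the non-space characters
lemma pv_count_eq (l : List Char) (init : Int) :
    l.foldl (fun nv c => if c ≠ ' ' then nv + 1 else nv) init
      = init + (l.countP (fun c => c ≠ ' ') : Int) := by
  induction l generalizing init with
  | nil => simp
  | cons c l ih =>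
    simp only [List.foldl_cons, List.countP_cons, ih]
    by_cases h : c = ' ' <;> simp [h] <;> push_cast <;> ring

-- A's range-indexed loop equals that count over the characters
lemma pv_loop (f : String) :
    (PySem.List.pyRange 0 (PySem.Str.len f) 1).foldl
      (fun nv x => if PySem.List.pyGetD f.toList x ' ' ≠ ' ' then nv + 1 else nv) (0:Int)
      = (f.toList.countP (fun c => c ≠ ' ') : Int) := by
  rw [PySem.Str.len_eq,
    PySem.List.foldl_pyRange_zero_pyGetD' f.toList ' '
      (fun nv c => if c ≠ ' ' then nv + 1 else nv) (0:Int),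
    pv_count_eq]
  simp

-- ===== VERDICT (by name: the statement is the Claim_ definition above) =====
theorem soloespacios_spec : Claim_equal_soloespacios := by
  intro f _
  unfold Spec_soloespacios soloespacios soloespacios_alt
  show (if (PySem.List.pyRange 0 (PySem.Str.len f) 1).foldl
      (fun nv x => if PySem.List.pyGetD f.toList x ' ' ≠ ' ' then nv + 1 else nv) (0:Int) = 0
    then true else false) = _
  rw [pv_loop f]
  simp only [PySem.Str.len_eq, PySem.List.pyRepeat_singleton, Int.toNat_natCast]
  have key : (∀ a ∈ f.toList, a = ' ') ↔ f.toList = List.replicate f.length ' ' := by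
    rw [List.eq_replicate_iff]; simp
  simp [key]
  by_cases h2 : f.toList = List.replicate f.length ' ' <;> simp [h2]
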